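-- pv_equiv track=rewrite | github.com/YundaQiu/PyMVPA | mvpa2/cmdline/helpers.py | strip_from_docstring
-- ===== SOURCE A (Python) =====
-- def strip_from_docstring(doc, paragraphs=None, sections=None):
--     if paragraphs is None:
--         paragraphs = []
--     if sections is None:
--         sections = []
--     out = []
--     # split into paragraphs
--     doc = doc.split('\n\n')
--     section = ''
--     for par_i, par in enumerate(doc):
--         lines = par.split('\n')
--         if len(lines) > 1 \
--            and len(lines[0]) == len(lines[1]) \
--            and lines[1] == '-' * len(lines[0]):
--                section = lines[0]
--         if (par_i in paragraphs) or (section in sections):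
--             continue
--         out.append(par)
--     return '\n\n'.join(out)
-- ===== SOURCE B (Python) =====
-- def strip_from_docstring(doc, paragraphs=None, sections=None):
--     paragraphs = paragraphs or []
--     sections = sections or []
--
--     def is_heading(par):
--         lines = par.split('\n')
--         return len(lines) > 1 and len(lines[0]) == len(lines[1]) \
--             and lines[1] == '-' * len(lines[0])
--
--     def blocks(i, pars, label):
--         # cut `pars` into labelled blocks: each block runs up to (excluding)
--         # the next underlined heading, which opens the following block
--         if not pars:
--             return []
--         if is_heading(pars[0]):
--             label = pars[0].split('\n')[0]
--         body = pars[1:]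
--         j = 0
--         while j < len(body) and not is_heading(body[j]):
--             j += 1
--         block = list(enumerate(pars[:j + 1], i))
--         return [(label, block)] + blocks(i + j + 1, body[j:], label)
--
--     out = []
--     for label, items in blocks(0, doc.split('\n\n'), ''):
--         if label not in sections:
--             out.extend(p for i, p in items if i not in paragraphs)
--     return '\n\n'.join(out)
-- ===== Notes on version B (the rewrite author's own statement) =====
-- stated objective: alternative
-- what changed: A's single scan with a mutable section variable and per-paragraph drop test is replaced by cutting the paragraph list into labelled section blocks (a recursive span at each underlined heading), discarding whole blocks whose label is in `sections`, and filtering indices inside the kept blocks before joining.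
import Mathlib
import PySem

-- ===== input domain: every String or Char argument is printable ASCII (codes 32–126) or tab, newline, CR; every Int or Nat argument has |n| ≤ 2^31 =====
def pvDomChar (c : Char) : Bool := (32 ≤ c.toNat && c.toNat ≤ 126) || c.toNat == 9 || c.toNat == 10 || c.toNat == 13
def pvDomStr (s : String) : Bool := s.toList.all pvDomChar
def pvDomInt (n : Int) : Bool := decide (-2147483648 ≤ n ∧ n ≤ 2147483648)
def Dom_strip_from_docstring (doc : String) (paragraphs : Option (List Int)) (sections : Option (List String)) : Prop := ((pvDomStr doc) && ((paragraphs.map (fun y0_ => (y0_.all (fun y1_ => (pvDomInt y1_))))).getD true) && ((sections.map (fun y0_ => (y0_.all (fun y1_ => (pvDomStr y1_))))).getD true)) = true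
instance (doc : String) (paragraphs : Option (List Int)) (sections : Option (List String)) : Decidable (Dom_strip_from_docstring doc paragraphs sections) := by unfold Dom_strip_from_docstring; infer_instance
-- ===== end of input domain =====

-- B replaces A's per-paragraph section-state scan by cutting the paragraph list into labelled section blocks (span at each underlined heading), dropping whole blocks by label, and filtering indices within kept blocks (alternative decomposition, same cost).


-- ===== PORT A =====
def aLoop (pargs : List Int) (secs : List (List Char)) : Int → List Char → List (List Char) → List (List Char) → List (List Char)
  | _, _, out, [] => out
  | i, sec, out, p :: ps =>
      let lines := PySem.Chars.splitOn p ['\n']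
      let sec' := match lines with
        | l0 :: l1 :: _ =>
            if l0.length = l1.length ∧ l1 = List.replicate l0.length '-' then l0 else sec
        | _ => sec
      let out' := if i ∈ pargs ∨ sec' ∈ secs then out else out ++ [p]
      aLoop pargs secs (i + 1) sec' out' ps

def strip_from_docstring (doc : String) (paragraphs : Option (List Int)) (sections : Option (List String)) : String :=
  let pargs := paragraphs.getD []
  let secs := (sections.getD []).map String.toList
  let pars := PySem.Chars.splitOn doc.toList ['\n', '\n']
  String.ofList (PySem.Chars.join ['\n', '\n'] (aLoop pargs secs 0 [] [] pars))

-- ===== PORT B =====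
-- Source B's `is_heading`
def isHeading (p : List Char) : Bool :=
  match PySem.Chars.splitOn p ['\n'] with
  | l0 :: l1 :: _ => decide (l0.length = l1.length) && decide (l1 = List.replicate l0.length '-')
  | _ => false

-- Source B's `pars[0].split('\n')[0]` (split never returns an empty list)
def headingOf (p : List Char) : List Char :=
  (PySem.Chars.splitOn p ['\n']).headD []

-- Source B's recursive `blocks`: the inner `while` advance is `takeWhile`/`drop`
def bBlocks : Int → List (List Char) → List Char → List (List Char × List (Int × List Char))
  | _, [], _ => []
  | i, p :: body, label =>
      let label' := if isHeading p then headingOf p else label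
      let pre := body.takeWhile (fun q => !isHeading q)
      (label', PySem.List.enumerate (p :: pre) i) ::
        bBlocks (i + pre.length + 1) (body.drop pre.length) label'
  termination_by _ ps _ => ps.length
  decreasing_by
    simp only [List.length_drop, List.length_cons]
    omega

def strip_from_docstring_alt (doc : String) (paragraphs : Option (List Int)) (sections : Option (List String)) : String :=
  let pargs := paragraphs.getD []
  let secs := (sections.getD []).map String.toList
  let pars := PySem.Chars.splitOn doc.toList ['\n', '\n']
  let out := (bBlocks 0 pars []).foldl
    (fun out b =>
      if b.1 ∈ secs then out
      else out ++ (b.2.filter (fun it => !(decide (it.1 ∈ pargs)))).map (·.2)) []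
  String.ofList (PySem.Chars.join ['\n', '\n'] out)

-- ===== PRECONDITION & SPEC =====
def Spec_strip_from_docstring (doc : String) (paragraphs : Option (List Int)) (sections : Option (List String)) (out : String) : Prop := out = strip_from_docstring_alt doc paragraphs sections
instance (doc : String) (paragraphs : Option (List Int)) (sections : Option (List String)) (out : String) : Decidable (Spec_strip_from_docstring doc paragraphs sections out) := by unfold Spec_strip_from_docstring; infer_instance

-- ===== CLAIM (what is proved, stated in full; the proofs are below) =====
def Claim_equal_strip_from_docstring : Prop := ∀ (doc : String) (paragraphs : Option (List Int)) (sections : Option (List String)), Dom_strip_from_docstring doc paragraphs sections → Spec_strip_from_docstring doc paragraphs sections (strip_from_docstring doc paragraphs sections)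

-- ===== LEMMAS AND PROOFS =====

-- proof-side helper: A's running section label, listed per paragraph
def headState (sec : List Char) (p : List Char) : List Char :=
  match PySem.Chars.splitOn p ['\n'] with
  | l0 :: l1 :: _ =>
      if l0.length = l1.length ∧ l1 = List.replicate l0.length '-' then l0 else sec
  | _ => sec

def bLabels : List Char → List (List Char) → List (List Char)
  | _, [] => []
  | sec, p :: ps => let s := headState sec p; s :: bLabels s ps

lemma headState_eq (sec p : List Char) :
    headState sec p = if isHeading p then headingOf p else sec := by
  unfold headState isHeading headingOf
  rcases h : PySem.Chars.splitOn p ['\n'] with _ | ⟨l0, _ | ⟨l1, rest⟩⟩ <;>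
    simp [h] <;> split_ifs <;> simp_all

lemma bLabels_nonheads (L : List Char) (pre rest : List (List Char))
    (h : ∀ q ∈ pre, isHeading q = false) :
    bLabels L (pre ++ rest) = pre.map (fun _ => L) ++ bLabels L rest := by
  induction pre with
  | nil => simp
  | cons q qs ih =>
      have hq : isHeading q = false := h q (by simp)
      simp only [List.cons_append, bLabels, headState_eq, hq, Bool.false_eq_true, if_false,
        List.map_cons, List.cons_append, List.cons.injEq, true_and]
      exact ih (fun x hx => h x (by simp [hx]))

lemma aLoop_eq (pargs : List Int) (secs : List (List Char)) (ps : List (List Char)) :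
    ∀ (i : Int) (sec : List Char) (out : List (List Char)),
      aLoop pargs secs i sec out ps =
        out ++ ((PySem.List.enumerate (ps.zip (bLabels sec ps)) i).filter
          (fun x => !(decide (x.1 ∈ pargs)) && !(decide (x.2.2 ∈ secs)))).map (·.2.1) := by
  induction ps with
  | nil => intro i sec out; simp [aLoop, bLabels, PySem.List.enumerate_nil]
  | cons p ps ih =>
      intro i sec out
      simp only [aLoop, bLabels, PySem.List.enumerate_cons, List.zip_cons_cons, List.filter_cons]
      have hsec : (match PySem.Chars.splitOn p ['\n'] with
        | l0 :: l1 :: _ =>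
            if l0.length = l1.length ∧ l1 = List.replicate l0.length '-' then l0 else sec
        | _ => sec) = headState sec p := by
        simp [headState]
      rw [hsec]
      by_cases h : i ∈ pargs ∨ headState sec p ∈ secs
      · have : (!(decide (i ∈ pargs)) && !(decide (headState sec p ∈ secs))) = false := by
          rcases h with h | h <;> simp [h]
        simp only [if_pos h, this, Bool.false_eq_true, if_false]
        exact ih (i + 1) (headState sec p) out
      · have : (!(decide (i ∈ pargs)) && !(decide (headState sec p ∈ secs))) = true := by
          push Not at h; simp [h.1, h.2]
        simp only [if_neg h, this, if_true, List.map_cons]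
        rw [ih (i + 1) (headState sec p) (out ++ [p]), List.append_assoc]
        rfl

-- a constant-labelled chunk: filtering the combined predicate = drop-or-filter the block
lemma chunk_filter (pargs : List Int) (secs : List (List Char)) (L : List Char)
    (xs : List (List Char)) : ∀ (i : Int),
    ((PySem.List.enumerate (xs.zip (xs.map (fun _ => L))) i).filter
        (fun x => !(decide (x.1 ∈ pargs)) && !(decide (x.2.2 ∈ secs)))).map (·.2.1) =
      if L ∈ secs then []
      else ((PySem.List.enumerate xs i).filter (fun it => !(decide (it.1 ∈ pargs)))).map (·.2) := by
  induction xs with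
  | nil => intro i; simp [PySem.List.enumerate_nil]
  | cons x xs ih =>
      intro i
      simp only [List.map_cons, List.zip_cons_cons, PySem.List.enumerate_cons]
      by_cases hL : L ∈ secs
      · rw [List.filter_cons_of_neg (by simp [hL]), ih (i + 1), if_pos hL, if_pos hL]
      · rw [if_neg hL]
        by_cases hp : i ∈ pargs
        · rw [List.filter_cons_of_neg (by simp [hp]),
              List.filter_cons_of_neg (by simp [hp]), ih (i + 1), if_neg hL]
        · rw [List.filter_cons_of_pos (by simp [hp, hL]),
              List.filter_cons_of_pos (by simp [hp]), List.map_cons, List.map_cons,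
              ih (i + 1), if_neg hL]

lemma bBlocks_eq (pargs : List Int) (secs : List (List Char)) :
    ∀ (n : ℕ) (ps : List (List Char)), ps.length ≤ n → ∀ (i : Int) (sec : List Char),
      (bBlocks i ps sec).flatMap
          (fun b => if b.1 ∈ secs then []
            else (b.2.filter (fun it => !(decide (it.1 ∈ pargs)))).map (·.2)) =
        ((PySem.List.enumerate (ps.zip (bLabels sec ps)) i).filter
          (fun x => !(decide (x.1 ∈ pargs)) && !(decide (x.2.2 ∈ secs)))).map (·.2.1) := by
  intro n
  induction n with
  | zero =>
      intro ps hps i sec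
      have : ps = [] := List.eq_nil_of_length_eq_zero (Nat.le_zero.mp hps)
      subst this; simp [bBlocks, bLabels, PySem.List.enumerate_nil]
  | succ n ih =>
      intro ps hps i sec
      match ps with
      | [] => simp [bBlocks, bLabels, PySem.List.enumerate_nil]
      | p :: body =>
        rw [bBlocks]
        set L := if isHeading p then headingOf p else sec with hL
        set pre := body.takeWhile (fun q => !isHeading q) with hpre
        set post := body.drop pre.length with hpost
        have hsplit : body = pre ++ post := by
          conv_lhs => rw [← List.take_append_drop pre.length body]
          rw [hpost]
          congr 1
          exact ((List.prefix_iff_eq_take).mp (List.takeWhile_prefix _)).symm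
        have hprenh : ∀ q ∈ pre, isHeading q = false := by
          intro q hq
          have := List.mem_takeWhile_imp (hpre ▸ hq)
          simpa using this
        have hlab : bLabels sec (p :: body) = L :: (pre.map (fun _ => L) ++ bLabels L post) := by
          simp only [bLabels, headState_eq, ← hL]
          rw [hsplit, bLabels_nonheads L pre post hprenh]
        have hlen : pre.length ≤ body.length := by
          rw [hsplit]; simp
        have hrec := ih post (by
          have : post.length ≤ body.length := by rw [hpost]; simp
          have : body.length ≤ n := Nat.lt_succ_iff.mp (by simpa using hps)
          omega) (i + pre.length + 1) L
        -- assemble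
        rw [List.flatMap_cons, hrec, hlab]
        have hzip : (p :: body).zip (L :: (pre.map (fun _ => L) ++ bLabels L post)) =
            ((p :: pre).zip ((p :: pre).map (fun _ => L))) ++ post.zip (bLabels L post) := by
          rw [hsplit]
          simp only [List.zip_cons_cons, List.map_cons, List.cons_append]
          congr 1
          exact List.zip_append (by simp)
        rw [hzip, PySem.List.enumerate_append, List.filter_append, List.map_append]
        have hlen2 : ((p :: pre).zip ((p :: pre).map (fun _ => L))).length = pre.length + 1 := by
          simp
        rw [hlen2, chunk_filter]
        congr 2
        · push_cast; ring

-- ===== VERDICT (by name: the statement is the Claim_ definition above) =====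
theorem strip_from_docstring_spec : Claim_equal_strip_from_docstring := by
  intro doc paragraphs sections _
  unfold Spec_strip_from_docstring strip_from_docstring strip_from_docstring_alt
  simp only []
  rw [aLoop_eq]
  have hfe : (fun (out : List (List Char)) (b : List Char × List (Int × List Char)) =>
      if b.1 ∈ (sections.getD []).map String.toList then out
      else out ++ (b.2.filter (fun it => !(decide (it.1 ∈ paragraphs.getD [])))).map (·.2)) =
      (fun out b => out ++ (if b.1 ∈ (sections.getD []).map String.toList then []
        else (b.2.filter (fun it => !(decide (it.1 ∈ paragraphs.getD [])))).map (·.2))) := by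
    funext out b; split_ifs <;> simp
  rw [hfe, PySem.List.foldl_append_eq_flatMap,
      bBlocks_eq (paragraphs.getD []) ((sections.getD []).map String.toList) _ _ le_rfl 0 []]
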